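-- pv_equiv track=rewrite | github.com/josondev/ideal-invention | oppe2/oppe2 mock1.py | primes_galore
-- ===== SOURCE A (Python) =====
-- def is_prime(n):
--     #def is_prime(n):
--     # Check if the number is less than
--     # or equal to 1, return False if it is
--     if n <= 1:
--         return False
--     # Loop through all numbers from 2 to
--     # the square root of n (rounded down to the nearest integer)
--     for i in range(2, int(n**0.5)+1):
--         # If n is divisible by any of these numbers, return False
--         if n % i == 0:
--             return False
--     # If n is not divisible by any of these numbers, return True
--     return True
--
-- def primes_galore(L):
--     result=[];count=0
--     for i in range(len(L)):
--         if(is_prime(i)):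
--             result.append(L[i])
--     for num in result:
--         if(is_prime(num)):
--             count+=1
--     return(count)
-- ===== SOURCE B (Python) =====
-- def _is_prime_value(v):
--     # odd trial division
--     if v < 2:
--         return False
--     if v % 2 == 0:
--         return v == 2
--     d = 3
--     while d * d <= v:
--         if v % d == 0:
--             return False
--         d += 2
--     return True
--
-- def primes_galore(L):
--     # incremental sieve over the indices: p is a prime index iff it was
--     # never marked as a multiple of a smaller prime
--     n = len(L)
--     composite = set()
--     count = 0
--     for p in range(2, n):
--         if p not in composite:
--             if _is_prime_value(L[p]):
--                 count += 1
--             for m in range(p * p, n, p):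
--                 composite.add(m)
--     return count
-- ===== Notes on version B (the rewrite author's own statement) =====
-- stated objective: faster
-- what changed: Replaces A's per-index trial-division test and intermediate result list by a single pass with an incremental Sieve of Eratosthenes (a set of marked composite indices) and an odd-only trial-division test for the values.
import Mathlib
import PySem

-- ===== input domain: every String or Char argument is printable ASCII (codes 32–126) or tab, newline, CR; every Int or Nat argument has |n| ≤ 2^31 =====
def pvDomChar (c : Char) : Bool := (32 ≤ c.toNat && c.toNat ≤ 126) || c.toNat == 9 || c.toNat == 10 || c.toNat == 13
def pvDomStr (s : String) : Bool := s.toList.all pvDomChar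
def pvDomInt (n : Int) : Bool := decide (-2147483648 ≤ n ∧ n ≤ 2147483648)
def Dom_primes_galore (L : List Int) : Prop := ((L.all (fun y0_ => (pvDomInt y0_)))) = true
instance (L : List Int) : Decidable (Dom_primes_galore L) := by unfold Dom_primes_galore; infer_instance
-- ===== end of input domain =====

-- B replaces A's per-index trial division and intermediate list by a one-pass incremental
-- sieve of Eratosthenes over the indices plus an odd-only trial division for the values
-- (measured faster in a timing run).

-- ===== PORT A =====
-- is_prime(n): trial division over range(2, int(n**0.5)+1); the 'for … return False' loop is the 'any'.
-- int(n**0.5) is ported as the exact floor square root Nat.sqrt: for 0 ≤ n ≤ 2^31 (the input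
-- domain) Python's correctly-rounded double sqrt floors to exactly isqrt(n).
def is_prime_A (n : Int) : Bool :=
  if n ≤ 1 then false
  else if (PySem.List.pyRange 2 ((((Int.toNat n).sqrt : Int)) + 1) 1).any
            (fun i => PySem.Int.mod n i == 0) then false
  else true

def primes_galore (L : List Int) : Int :=
  let result : List Int :=
    (PySem.List.pyRange 0 (L.length : Int) 1).foldl
      (fun acc i => if is_prime_A i then acc ++ [PySem.List.pyGetD L i 0] else acc) []
  result.foldl (fun count num => if is_prime_A num then count + 1 else count) 0

-- ===== PORT B =====
-- while d*d <= v: … d += 2   (odd trial division loop of _is_prime_value)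
def valPrimeLoop (v d : Int) : Bool :=
  if d * d ≤ v then
    if PySem.Int.mod v d == 0 then false else valPrimeLoop v (d + 2)
  else true
termination_by (v + 3 - d).toNat
decreasing_by
  have hd : d ≤ v := by
    rcases (by omega : d ≤ 0 ∨ 0 < d) with h' | h'
    · nlinarith [mul_self_nonneg d]
    · nlinarith
  omega

def is_prime_value (v : Int) : Bool :=
  if v < 2 then false
  else if PySem.Int.mod v 2 == 0 then v == 2
  else valPrimeLoop v 3

def primes_galore_alt (L : List Int) : Int :=
  let n : Int := (L.length : Int)
  (((PySem.List.pyRange 2 n 1).foldl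
      (fun (st : PySem.Set Int × Int) p =>
        if st.1.contains p then st
        else
          ((PySem.List.pyRange (p * p) n p).foldl (fun s m => PySem.Set.add s m) st.1,
           st.2 + (if is_prime_value (PySem.List.pyGetD L p 0) then 1 else 0)))
      (PySem.Set.empty, 0)).2 : Int)

-- ===== PRECONDITION & SPEC =====
def Spec_primes_galore (L : List Int) (out : Int) : Prop := out = primes_galore_alt L
instance (L : List Int) (out : Int) : Decidable (Spec_primes_galore L out) := by unfold Spec_primes_galore; infer_instance

-- ===== CLAIM (what is proved, stated in full; the proofs are below) =====
def Claim_equal_primes_galore : Prop := ∀ (L : List Int), Dom_primes_galore L → Spec_primes_galore L (primes_galore L)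

-- ===== LEMMAS AND PROOFS =====

-- A's tester decides integer primality.
lemma is_prime_A_iff (n : Int) : is_prime_A n = true ↔ 2 ≤ n ∧ Nat.Prime n.toNat := by
  unfold is_prime_A
  by_cases h1 : n ≤ 1
  · rw [if_pos h1]
    simp only [Bool.false_eq_true, false_iff, not_and]
    exact fun h2 => absurd h2 (by omega)
  · push Not at h1
    rw [if_neg (by omega : ¬ n ≤ 1)]
    have hcast : n = ((n.toNat : Int)) := by omega
    have hany : ((PySem.List.pyRange 2 (((Int.toNat n).sqrt : Int) + 1) 1).any
        (fun i => PySem.Int.mod n i == 0)) = true ↔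
        ∃ i : Int, 2 ≤ i ∧ i ≤ ((Int.toNat n).sqrt : Int) ∧ i ∣ n := by
      simp only [List.any_eq_true, PySem.List.mem_pyRange_one, beq_iff_eq,
        PySem.Int.mod_eq_zero_iff_dvd]
      constructor
      · rintro ⟨i, ⟨hi2, hilt⟩, hdvd⟩; exact ⟨i, hi2, by omega, hdvd⟩
      · rintro ⟨i, hi2, hile, hdvd⟩; exact ⟨i, ⟨hi2, by omega⟩, hdvd⟩
    split_ifs with h
    · simp only [false_iff, not_and]
      intro _ hp
      obtain ⟨i, hi2, hile, hdvd⟩ := hany.mp h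
      rw [Nat.prime_def_le_sqrt] at hp
      refine hp.2 i.toNat (by omega) (by omega) ?_
      rw [← Int.natCast_dvd_natCast, ← hcast, Int.toNat_of_nonneg (by omega)]
      exact hdvd
    · simp only [true_iff]
      refine ⟨by omega, ?_⟩
      rw [Nat.prime_def_le_sqrt]
      refine ⟨by omega, fun m hm2 hms hdvd => ?_⟩
      exact h (hany.mpr ⟨(m : Int), by exact_mod_cast hm2, by exact_mod_cast hms,
        by rw [hcast]; exact_mod_cast hdvd⟩)

-- B's odd trial-division loop.
lemma valPrimeLoop_iff (v d : Int) (hd : 0 ≤ d) :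
    valPrimeLoop v d = true ↔ ∀ k : Nat, (d + 2 * k) * (d + 2 * k) ≤ v → ¬ (d + 2 * k) ∣ v := by
  revert hd
  refine valPrimeLoop.induct v (fun d => 0 ≤ d →
      (valPrimeLoop v d = true ↔
        ∀ k : Nat, (d + 2 * k) * (d + 2 * k) ≤ v → ¬ (d + 2 * k) ∣ v)) ?_ ?_ ?_ d
  · intro d hle hdvd hd
    rw [valPrimeLoop, if_pos hle, if_pos hdvd]
    simp only [Bool.false_eq_true, false_iff, not_forall]
    refine ⟨0, ?_⟩
    simp only [Nat.cast_zero, mul_zero, add_zero, not_not]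
    rw [beq_iff_eq, PySem.Int.mod_eq_zero_iff_dvd] at hdvd
    exact ⟨hle, hdvd⟩
  · intro d hle hdvd ih hd
    rw [valPrimeLoop, if_pos hle, if_neg hdvd]
    rw [ih (by omega)]
    constructor
    · intro h k hk
      rcases k with _ | k
      · simp only [Nat.cast_zero, mul_zero, add_zero] at hk ⊢
        intro hdv
        exact hdvd (by rw [beq_iff_eq, PySem.Int.mod_eq_zero_iff_dvd]; exact hdv)
      · have := h k
        push_cast at this hk ⊢
        have heq : d + 2 * ((k : Int) + 1) = d + 2 + 2 * k := by ring
        rw [heq]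
        exact this (by linarith [hk, heq ▸ hk])
    · intro h k hk
      have := h (k + 1)
      push_cast at this hk ⊢
      have heq : d + 2 * ((k : Int) + 1) = d + 2 + 2 * k := by ring
      rw [heq] at this
      exact this hk
  · intro d hle hd
    rw [valPrimeLoop, if_neg hle]
    simp only [true_iff]
    intro k hk
    exfalso
    apply hle
    nlinarith [hk, (Nat.cast_nonneg k : (0:Int) ≤ k)]

-- B's value tester agrees with A's tester.
lemma is_prime_value_iff (v : Int) : is_prime_value v = true ↔ 2 ≤ v ∧ Nat.Prime v.toNat := by
  unfold is_prime_value
  by_cases h1 : v < 2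
  · rw [if_pos h1]
    simp only [Bool.false_eq_true, false_iff, not_and]
    exact fun h2 => absurd h2 (by omega)
  · push Not at h1
    rw [if_neg (by omega : ¬ v < 2)]
    by_cases heven : PySem.Int.mod v 2 == 0
    · rw [if_pos heven]
      rw [beq_iff_eq, PySem.Int.mod_eq_zero_iff_dvd] at heven
      constructor
      · intro h
        rw [beq_iff_eq] at h
        subst h
        exact ⟨by omega, Nat.prime_two⟩
      · rintro ⟨-, hp⟩
        have h2 : (2 : Nat) ∣ v.toNat := by
          have : v = ((v.toNat : Int)) := by omega
          rw [this] at heven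
          exact_mod_cast heven
        rcases (hp.eq_one_or_self_of_dvd 2 h2) with h | h
        · omega
        · rw [beq_iff_eq]; omega
    · rw [if_neg heven]
      rw [beq_iff_eq, PySem.Int.mod_eq_zero_iff_dvd] at heven
      have hodd : ¬ (2 : Int) ∣ v := heven
      rw [valPrimeLoop_iff v 3 (by omega)]
      constructor
      · intro h
        refine ⟨by omega, ?_⟩
        by_contra hnp
        set m := v.toNat.minFac with hm
        have hmp : Nat.Prime m := Nat.minFac_prime (by omega)
        have hmd : (m : Int) ∣ v := by
          have : v = ((v.toNat : Int)) := by omega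
          rw [this]
          exact_mod_cast v.toNat.minFac_dvd
        have hmsq : (m : Int) * (m : Int) ≤ v := by
          have := Nat.minFac_sq_le_self (by omega : 0 < v.toNat) hnp
          rw [pow_two] at this
          have h2 : ((m * m : Nat) : Int) ≤ ((v.toNat : Nat) : Int) := by exact_mod_cast this
          push_cast at h2
          omega
        have hm2 : m ≠ 2 := by
          intro h2
          rw [h2] at hmd
          exact hodd (by exact_mod_cast hmd)
        have hm3 : 3 ≤ m := by
          have := hmp.two_le
          omega
        have hmo : m % 2 = 1 := by
          rcases Nat.mod_two_eq_zero_or_one m with h0 | h1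
          · exfalso
            have h2d : (2 : Nat) ∣ m := Nat.dvd_of_mod_eq_zero h0
            rcases (hmp.eq_one_or_self_of_dvd 2 h2d) with h | h <;> omega
          · exact h1
        -- m = 3 + 2 * k
        obtain ⟨k, hk⟩ : ∃ k : Nat, m = 3 + 2 * k := ⟨(m - 3) / 2, by omega⟩
        refine h k ?_ ?_
        · have : ((3 : Int) + 2 * k) = ((m : Nat) : Int) := by omega
          rw [this]; exact hmsq
        · have : ((3 : Int) + 2 * k) = ((m : Nat) : Int) := by omega
          rw [this]; exact hmd
      · rintro ⟨-, hp⟩ k hksq hkd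
        set e : Int := 3 + 2 * (k : Int) with he
        have hek : 0 ≤ (k : Int) := by positivity
        have he3 : 3 ≤ e := by omega
        have helt : e < v := by nlinarith
        have hed : e.toNat ∣ v.toNat := by
          have hv : v = ((v.toNat : Int)) := by omega
          have hee : e = ((e.toNat : Int)) := by omega
          rw [hv, hee] at hkd
          exact_mod_cast hkd
        rcases hp.eq_one_or_self_of_dvd e.toNat hed with h | h <;> omega

-- B's value tester agrees with A's tester.
lemma is_prime_value_eq (v : Int) : is_prime_value v = is_prime_A v := by
  rw [Bool.eq_iff_iff, is_prime_value_iff, is_prime_A_iff]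

-- the inner marking fold is set union with the multiples
lemma mem_foldl_add (l : List Int) (s : PySem.Set Int) (x : Int) :
    x ∈ l.foldl (fun s m => PySem.Set.add s m) s ↔ x ∈ s ∨ x ∈ l := by
  induction l generalizing s with
  | nil => simp
  | cons a t ih => simp only [List.foldl_cons, ih, PySem.Set.mem_add, List.mem_cons]; tauto

-- m has been marked by the time index p is reached
def MarkedBy (n p m : Int) : Prop :=
  ∃ q : Int, 2 ≤ q ∧ q < p ∧ Nat.Prime q.toNat ∧ q ∣ m ∧ q * q ≤ m ∧ m < n

-- an index below p is unmarked iff it is prime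
lemma not_markedBy_self (n p : Int) (h2 : 2 ≤ p) (hn : p < n) :
    ¬ MarkedBy n p p ↔ Nat.Prime p.toNat := by
  constructor
  · intro h
    by_contra hnp
    apply h
    set m := p.toNat.minFac with hm
    have hmp : Nat.Prime m := Nat.minFac_prime (by omega)
    have hpc : p = ((p.toNat : Int)) := by omega
    have hmd : (m : Int) ∣ p := by
      rw [hpc]; exact_mod_cast p.toNat.minFac_dvd
    have hmdn : m ∣ p.toNat := p.toNat.minFac_dvd
    have hmsq : (m : Int) * (m : Int) ≤ p := by
      have := Nat.minFac_sq_le_self (by omega : 0 < p.toNat) hnp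
      rw [pow_two] at this
      have h2' : ((m * m : Nat) : Int) ≤ ((p.toNat : Nat) : Int) := by exact_mod_cast this
      push_cast at h2'
      omega
    have hmlt : (m : Int) < p := by
      have hle : m ≤ p.toNat := Nat.le_of_dvd (by omega) hmdn
      have hne : m ≠ p.toNat := by
        intro he
        exact hnp (he ▸ hmp)
      omega
    exact ⟨(m : Int), by exact_mod_cast hmp.two_le, hmlt, by simpa using hmp, hmd, hmsq, hn⟩
  · rintro hp ⟨q, hq2, hqlt, -, hqd, -, -⟩
    have hqd' : q.toNat ∣ p.toNat := by
      have hpc : p = ((p.toNat : Int)) := by omega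
      have hqc : q = ((q.toNat : Int)) := by omega
      rw [hpc, hqc] at hqd
      exact_mod_cast hqd
    rcases hp.eq_one_or_self_of_dvd q.toNat hqd' with h | h <;> omega

abbrev sieveStep (L : List Int) : PySem.Set Int × Int → Int → PySem.Set Int × Int :=
  fun st p =>
    if st.1.contains p then st
    else
      ((PySem.List.pyRange (p * p) ((L.length : Int)) p).foldl (fun s m => PySem.Set.add s m) st.1,
       st.2 + (if is_prime_value (PySem.List.pyGetD L p 0) then 1 else 0))

-- the loop invariant of B's sieve
lemma sieve_inv (L : List Int) (p : Int) (h2 : 2 ≤ p) (hpn : p ≤ (L.length : Int)) :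
    (∀ m, m ∈ ((PySem.List.pyRange 2 p 1).foldl (sieveStep L) (PySem.Set.empty, 0)).1 ↔
        MarkedBy (L.length : Int) p m) ∧
    ((PySem.List.pyRange 2 p 1).foldl (sieveStep L) (PySem.Set.empty, 0)).2 =
      (((PySem.List.pyRange 2 p 1).filter
          (fun i => is_prime_A i && is_prime_A (PySem.List.pyGetD L i 0))).length : Int) := by
  revert hpn
  refine Int.le_induction ?_ ?_ p h2
  · intro _
    rw [PySem.List.pyRange_one_eq_nil (le_refl 2)]
    constructor
    · intro m
      simp only [List.foldl_nil, MarkedBy]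
      constructor
      · intro hm; cases hm
      · rintro ⟨q, hq2, hqlt, -⟩; omega
    · simp
  · intro p hp ih hpn
    have hplt : p < (L.length : Int) := by omega
    have hinv := ih (by omega)
    rw [PySem.List.pyRange_one_succ_right (by omega : (2:Int) ≤ p), List.foldl_append,
      List.filter_append, List.length_append]
    set S := (PySem.List.pyRange 2 p 1).foldl (sieveStep L) (PySem.Set.empty, 0) with hS
    obtain ⟨hmem, hcnt⟩ := hinv
    simp only [List.foldl_cons, List.foldl_nil]
    by_cases hc : S.1.contains p
    · -- p already marked: p is composite
      have hpin : p ∈ S.1 := List.contains_iff_mem.mp hc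
      have hmk : MarkedBy (L.length : Int) p p := (hmem p).mp hpin
      have hnp : ¬ Nat.Prime p.toNat := by
        rw [← not_markedBy_self (L.length : Int) p hp hplt]
        exact fun h => h hmk
      have hfalse : is_prime_A p = false := by
        rw [← Bool.not_eq_true, is_prime_A_iff]
        exact fun h => hnp h.2
      rw [sieveStep, if_pos hc]
      constructor
      · intro m
        rw [hmem m]
        unfold MarkedBy
        constructor
        · rintro ⟨q, hq⟩; exact ⟨q, hq.1, by omega, hq.2.2⟩
        · rintro ⟨q, hq2, hqlt, hqp, hrest⟩
          refine ⟨q, hq2, ?_, hqp, hrest⟩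
          rcases (by omega : q < p ∨ q = p) with h | h
          · exact h
          · exfalso; subst h; exact hnp hqp
      · rw [hcnt]
        simp [hfalse]
    · -- p unmarked: p is prime
      have hpnin : p ∉ S.1 := fun h => hc (List.contains_iff_mem.mpr h)
      have hpp : Nat.Prime p.toNat := by
        rw [← not_markedBy_self (L.length : Int) p hp hplt]
        exact fun h => hpnin ((hmem p).mpr h)
      have htrue : is_prime_A p = true := by rw [is_prime_A_iff]; exact ⟨hp, hpp⟩
      rw [sieveStep, if_neg hc]
      constructor
      · intro m
        rw [mem_foldl_add, hmem m,
          PySem.List.mem_pyRange_iff_of_pos (by omega : (0:Int) < p) m]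
        unfold MarkedBy
        constructor
        · rintro (⟨q, hq⟩ | ⟨hge, hlt, hdvd⟩)
          · exact ⟨q, hq.1, by omega, hq.2.2⟩
          · refine ⟨p, by omega, by omega, hpp, ?_, hge, hlt⟩
            have hpd : p ∣ p * p := dvd_mul_left p p
            simpa using dvd_add hdvd hpd
        · rintro ⟨q, hq2, hqlt, hqp, hqd, hqsq, hmn⟩
          rcases (by omega : q < p ∨ q = p) with h | h
          · exact Or.inl ⟨q, hq2, h, hqp, hqd, hqsq, hmn⟩
          · subst h
            refine Or.inr ⟨hqsq, hmn, ?_⟩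
            exact dvd_sub hqd (dvd_mul_left q q)
      · by_cases hv : is_prime_A (PySem.List.pyGetD L p 0) = true
        · simp only [hcnt, is_prime_value_eq, htrue, hv, List.filter_cons, Bool.true_and,
            if_pos, List.length_cons, List.filter_nil, List.length_nil]
          push_cast
          ring
        · simp [hcnt, is_prime_value_eq, htrue, hv]

lemma is_prime_A_zero : is_prime_A 0 = false := by decide

lemma is_prime_A_one : is_prime_A 1 = false := by decide

-- B's result as a filter length, for every L
lemma alt_eq_filter (L : List Int) :
    primes_galore_alt L =
      (((PySem.List.pyRange 2 (L.length : Int) 1).filter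
          (fun i => is_prime_A i && is_prime_A (PySem.List.pyGetD L i 0))).length : Int) := by
  have hB : primes_galore_alt L =
      ((PySem.List.pyRange 2 (L.length : Int) 1).foldl (sieveStep L) (PySem.Set.empty, 0)).2 := rfl
  by_cases h2 : 2 ≤ (L.length : Int)
  · rw [hB, (sieve_inv L (L.length : Int) h2 (le_refl _)).2]
  · rw [hB, PySem.List.pyRange_one_eq_nil (by omega : (L.length : Int) ≤ 2)]
    simp

-- ===== VERDICT (by name: the statement is the Claim_ definition above) =====
theorem primes_galore_spec : Claim_equal_primes_galore := by
  intro L _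
  unfold Spec_primes_galore primes_galore
  rw [PySem.List.foldl_append_if, PySem.List.foldl_count_if]
  simp only [List.nil_append, zero_add]
  rw [List.countP_map, List.countP_filter]
  rw [alt_eq_filter, ← List.countP_eq_length_filter]
  have hcongr : ∀ l : List Int,
      List.countP (fun a =>
          (is_prime_A ∘ fun i => PySem.List.pyGetD L i 0) a && is_prime_A a) l =
        List.countP (fun i => is_prime_A i && is_prime_A (PySem.List.pyGetD L i 0)) l :=
    fun l => List.countP_congr (fun x _ => by simp [Bool.and_comm])
  by_cases h2 : 2 ≤ (L.length : Int)
  · rw [PySem.List.pyRange_one_append 0 2 (L.length : Int) (by omega) h2,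
      List.countP_append]
    have h01 : PySem.List.pyRange 0 2 1 = [0, 1] := by decide
    rw [h01, hcongr]
    simp only [List.countP_cons, List.countP_nil, Function.comp_apply, is_prime_A_zero,
      is_prime_A_one]
    simp
    exact List.countP_congr (fun x _ => by rw [Bool.and_comm])
  · have h0 : (L.length : Int) ≤ 1 := by omega
    rcases (by omega : (L.length : Int) = 0 ∨ (L.length : Int) = 1) with h | h
    · rw [h]
      rw [PySem.List.pyRange_one_eq_nil (by omega : (0:Int) ≤ 0),
        PySem.List.pyRange_one_eq_nil (by omega : (0:Int) ≤ 2)]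
      simp
    · rw [h]
      have hr : PySem.List.pyRange 0 1 1 = [0] := by decide
      rw [hr, PySem.List.pyRange_one_eq_nil (by omega : (1:Int) ≤ 2)]
      simp [is_prime_A_zero]
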